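-- pv_equiv track=rewrite | github.com/IAPaulin/Python | modCaesar/crypt/coding.py | processing_text
-- ===== SOURCE A (Python) =====
-- def processing_text(text):
--     result = ""
--     number = {1: 'one', 2: 'two', 3: 'three', 4: 'four', 5: 'five', 6: 'six', 7: 'seven', 8: 'eight', 9: 'nine',
--               0: 'zero'}
--
--     sign = {'.': 'point', ',': 'comma', '?': 'question', '!': 'exclamation', '-': 'minus', '+': 'plus', '=': 'equally',
--             '*': 'star', '/': 'slash', '\\': 'reversl', ' ': 'space', ':': 'colon', '%': 'percent'}
--
--     text = text.lower()
--
--     for char in text: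
--         if char in '1234567890':
--             key = int(char)
--             char = number[key]
--         elif char in '.,?!-+=*/\\: %':
--             char = sign[char]
--         result += char
--     return result
-- ===== SOURCE B (Python) =====
-- _PASSES = [
--     ('0', 'zero'), ('1', 'one'), ('2', 'two'), ('3', 'three'), ('4', 'four'),
--     ('5', 'five'), ('6', 'six'), ('7', 'seven'), ('8', 'eight'), ('9', 'nine'),
--     ('.', 'point'), (',', 'comma'), ('?', 'question'), ('!', 'exclamation'),
--     ('-', 'minus'), ('+', 'plus'), ('=', 'equally'), ('*', 'star'),
--     ('/', 'slash'), ('\\', 'reversl'), (' ', 'space'), (':', 'colon'),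
--     ('%', 'percent'),
-- ]
--
-- def processing_text(text):
--     # Staged whole-string passes: every replacement word is purely alphabetic
--     # and no letter is itself a key, so the 23 passes never interfere and the
--     # result equals a single simultaneous per-character substitution.
--     text = text.lower()
--     for src, word in _PASSES:
--         text = text.replace(src, word)
--     return text
-- ===== Notes on version B (the rewrite author's own statement) =====
-- stated objective: alternative
-- what changed: Replaced A's single per-character accumulator loop with its if/elif dict dispatch by 23 staged whole-string str.replace passes, one per mapped character; this is correct because every replacement word is purely alphabetic and no letter is a key, so the passes cannot interfere.
import Mathlib
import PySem

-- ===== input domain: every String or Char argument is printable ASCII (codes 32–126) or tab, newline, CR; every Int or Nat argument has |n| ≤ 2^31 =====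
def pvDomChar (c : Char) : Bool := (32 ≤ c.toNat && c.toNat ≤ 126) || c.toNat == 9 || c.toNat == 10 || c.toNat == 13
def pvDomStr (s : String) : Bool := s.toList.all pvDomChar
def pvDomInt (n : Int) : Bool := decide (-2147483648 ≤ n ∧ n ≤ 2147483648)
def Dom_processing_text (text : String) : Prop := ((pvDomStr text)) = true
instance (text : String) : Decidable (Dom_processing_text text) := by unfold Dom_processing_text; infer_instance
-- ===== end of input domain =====

-- B replaces A's single per-character accumulator loop (if/elif over two dicts) by 23 staged
-- whole-string replace passes, one per mapped character (alternative decomposition; same value).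

-- ===== PORT A =====
def pvNumberA : PySem.Dict Int (List Char) := PySem.Dict.ofList
  [(1, ['o', 'n', 'e']),
   (2, ['t', 'w', 'o']),
   (3, ['t', 'h', 'r', 'e', 'e']),
   (4, ['f', 'o', 'u', 'r']),
   (5, ['f', 'i', 'v', 'e']),
   (6, ['s', 'i', 'x']),
   (7, ['s', 'e', 'v', 'e', 'n']),
   (8, ['e', 'i', 'g', 'h', 't']),
   (9, ['n', 'i', 'n', 'e']),
   (0, ['z', 'e', 'r', 'o'])]

def pvSignA : PySem.Dict Char (List Char) := PySem.Dict.ofList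
  [('.', ['p', 'o', 'i', 'n', 't']),
   (',', ['c', 'o', 'm', 'm', 'a']),
   ('?', ['q', 'u', 'e', 's', 't', 'i', 'o', 'n']),
   ('!', ['e', 'x', 'c', 'l', 'a', 'm', 'a', 't', 'i', 'o', 'n']),
   ('-', ['m', 'i', 'n', 'u', 's']),
   ('+', ['p', 'l', 'u', 's']),
   ('=', ['e', 'q', 'u', 'a', 'l', 'l', 'y']),
   ('*', ['s', 't', 'a', 'r']),
   ('/', ['s', 'l', 'a', 's', 'h']),
   ('\\', ['r', 'e', 'v', 'e', 'r', 's', 'l']),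
   (' ', ['s', 'p', 'a', 'c', 'e']),
   (':', ['c', 'o', 'l', 'o', 'n']),
   ('%', ['p', 'e', 'r', 'c', 'e', 'n', 't'])]

-- the char rebinding inside A's loop body: digit → number[int(char)], sign → sign[char], else unchanged
-- (number[key] / sign[char] can never miss in A, so getD's default is unreachable)
def pvStepA (char : Char) : List Char :=
  if (['1', '2', '3', '4', '5', '6', '7', '8', '9', '0'] : List Char).contains char then
    pvNumberA.getD ((PySem.Int.ofChars? [char]).getD 0) [char]
  else if (['.', ',', '?', '!', '-', '+', '=', '*', '/', '\\', ' ', ':', '%'] : List Char).contains char then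
    pvSignA.getD char [char]
  else [char]

def processing_text (text : String) : String :=
  String.mk (((PySem.Str.lower text).toList).foldl (fun result char => result ++ pvStepA char) [])

-- ===== PORT B =====
-- Source B's _PASSES list of (source char, word) string pairs
def pvPassesB : List (String × String) :=
  [("0", "zero"), ("1", "one"), ("2", "two"), ("3", "three"), ("4", "four"),
   ("5", "five"), ("6", "six"), ("7", "seven"), ("8", "eight"), ("9", "nine"),
   (".", "point"), (",", "comma"), ("?", "question"), ("!", "exclamation"),
   ("-", "minus"), ("+", "plus"), ("=", "equally"), ("*", "star"),
   ("/", "slash"), ("\\", "reversl"), (" ", "space"), (":", "colon"),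
   ("%", "percent")]

-- text = text.lower(); for src, word in _PASSES: text = text.replace(src, word); return text
def processing_text_alt (text : String) : String :=
  pvPassesB.foldl (fun t p => PySem.Str.replace t p.1 p.2) (PySem.Str.lower text)

-- ===== PRECONDITION & SPEC =====
def Spec_processing_text (text : String) (out : String) : Prop := out = processing_text_alt text
instance (text : String) (out : String) : Decidable (Spec_processing_text text out) := by unfold Spec_processing_text; infer_instance

-- ===== CLAIM =====
def Claim_equal_processing_text : Prop := ∀ (text : String), Dom_processing_text text → Spec_processing_text text (processing_text text)

-- ===== LEMMAS AND PROOFS =====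

-- one replace pass, seen on char lists
def pvPassesC : List (Char × List Char) :=
  [('0', ['z','e','r','o']), ('1', ['o','n','e']), ('2', ['t','w','o']),
   ('3', ['t','h','r','e','e']), ('4', ['f','o','u','r']), ('5', ['f','i','v','e']),
   ('6', ['s','i','x']), ('7', ['s','e','v','e','n']), ('8', ['e','i','g','h','t']),
   ('9', ['n','i','n','e']), ('.', ['p','o','i','n','t']), (',', ['c','o','m','m','a']),
   ('?', ['q','u','e','s','t','i','o','n']), ('!', ['e','x','c','l','a','m','a','t','i','o','n']),
   ('-', ['m','i','n','u','s']), ('+', ['p','l','u','s']), ('=', ['e','q','u','a','l','l','y']),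
   ('*', ['s','t','a','r']), ('/', ['s','l','a','s','h']), ('\\', ['r','e','v','e','r','s','l']),
   (' ', ['s','p','a','c','e']), (':', ['c','o','l','o','n']), ('%', ['p','e','r','c','e','n','t'])]

def pvSubst (p : Char × List Char) (y : Char) : List Char := if y == p.1 then p.2 else [y]

def pvChain (ps : List (Char × List Char)) (l : List Char) : List Char :=
  ps.foldl (fun t p => t.flatMap (pvSubst p)) l

-- single-char replace is a flatMap
theorem pv_go_single (c : Char) (w : List Char) :
    ∀ (l : List Char) (fuel : Nat) (acc : List Char), l.length ≤ fuel →
      PySem.Chars.replace.go [c] w fuel l acc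
        = acc.reverse ++ l.flatMap (fun x => if x == c then w else [x]) := by
  intro l
  induction l with
  | nil =>
      intro fuel acc _
      cases fuel <;> simp [PySem.Chars.replace.go]
  | cons x t ih =>
      intro fuel acc hle
      cases fuel with
      | zero => simp at hle
      | succ f =>
          have ht : t.length ≤ f := by simpa using hle
          by_cases hx : x = c
          · subst hx
            rw [show PySem.Chars.replace.go [x] w (f + 1) (x :: t) acc
                  = PySem.Chars.replace.go [x] w f t (w.reverse ++ acc) from by
                simp [PySem.Chars.replace.go, List.isPrefixOf]]
            rw [ih f (w.reverse ++ acc) ht]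
            simp [List.flatMap_cons]
          · have hbc : (c == x) = false := by
              simp only [beq_eq_false_iff_ne]; exact fun h => hx h.symm
            rw [show PySem.Chars.replace.go [c] w (f + 1) (x :: t) acc
                  = PySem.Chars.replace.go [c] w f t (x :: acc) from by
                simp [PySem.Chars.replace.go, List.isPrefixOf, hbc]]
            rw [ih f (x :: acc) ht]
            simp [List.flatMap_cons, hx]

theorem pv_replace_single (s : List Char) (c : Char) (w : List Char) :
    PySem.Chars.replace s [c] w = s.flatMap (fun x => if x == c then w else [x]) := by
  unfold PySem.Chars.replace
  simp only [List.isEmpty_cons, if_false, Bool.false_eq_true]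
  simpa using pv_go_single c w s s.length [] (le_refl _)

theorem pv_chain_flatMap (ps : List (Char × List Char)) :
    ∀ l : List Char, pvChain ps l = l.flatMap (fun c => pvChain ps [c]) := by
  induction ps with
  | nil => intro l; simp [pvChain]
  | cons p ps ih =>
      intro l
      show pvChain ps (l.flatMap (pvSubst p)) = l.flatMap (fun c => pvChain ps ([c].flatMap (pvSubst p)))
      rw [ih (l.flatMap (pvSubst p)), List.flatMap_assoc]
      refine List.flatMap_congr (fun c _ => ?_)
      rw [show List.flatMap (pvSubst p) [c] = pvSubst p c by simp, ih (pvSubst p c)]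

theorem pv_chain_notkey (x : Char) :
    ∀ ps : List (Char × List Char), (∀ p ∈ ps, x ≠ p.1) → pvChain ps [x] = [x] := by
  intro ps
  induction ps with
  | nil => intro _; simp [pvChain]
  | cons p ps ih =>
      intro h
      have hx : (x == p.1) = false := by
        simpa [beq_eq_false_iff_ne] using h p (List.mem_cons_self)
      show pvChain ps ([x].flatMap (pvSubst p)) = [x]
      have : [x].flatMap (pvSubst p) = [x] := by simp [pvSubst, hx]
      rw [this]
      exact ih (fun q hq => h q (List.mem_cons_of_mem _ hq))

theorem pv_char_eq (x : Char) : pvChain pvPassesC [x] = pvStepA x := by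
  by_cases hk : x ∈ (['0','1','2','3','4','5','6','7','8','9','.',',','?','!','-','+','=','*','/','\\',' ',':','%'] : List Char)
  · fin_cases hk <;> decide
  · simp only [List.mem_cons, List.not_mem_nil, or_false, not_or] at hk
    obtain ⟨h0,h1,h2,h3,h4,h5,h6,h7,h8,h9,hp,hc,hq,he,hm,hpl,heq,hs,hsl,hr,hsp,hco,hpc⟩ := hk
    have hA : pvStepA x = [x] := by
      unfold pvStepA
      rw [if_neg, if_neg]
      · simp only [List.contains_eq_mem, List.mem_cons, List.not_mem_nil, or_false,
          decide_eq_true_eq]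
        tauto
      · simp only [List.contains_eq_mem, List.mem_cons, List.not_mem_nil, or_false,
          decide_eq_true_eq]
        tauto
    rw [hA]
    apply pv_chain_notkey
    intro p hp'
    fin_cases hp' <;> simp_all

theorem pv_foldl_corr :
    ∀ (psB : List (String × String)) (psC : List (Char × List Char)),
      psB.map (fun p => (p.1.toList, p.2.toList)) = psC.map (fun p => ([p.1], p.2)) →
      ∀ t : String,
        (psB.foldl (fun t p => PySem.Str.replace t p.1 p.2) t).toList
          = psC.foldl (fun l p => PySem.Chars.replace l [p.1] p.2) t.toList := by
  intro psB
  induction psB with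
  | nil =>
      intro psC h t
      cases psC with
      | nil => rfl
      | cons q qs => simp at h
  | cons p ps ih =>
      intro psC h t
      cases psC with
      | nil => simp at h
      | cons q qs =>
          simp only [List.map_cons, List.cons.injEq, Prod.mk.injEq] at h
          obtain ⟨⟨h1, h2⟩, h3⟩ := h
          simp only [List.foldl_cons]
          rw [ih qs h3, PySem.Str.toList_replace, h1, h2]

theorem pv_replace_eq_chain :
    ∀ (ps : List (Char × List Char)) (l : List Char),
      ps.foldl (fun t p => PySem.Chars.replace t [p.1] p.2) l = pvChain ps l := by
  intro ps
  induction ps with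
  | nil => intro l; rfl
  | cons p qs ih =>
      intro l
      show qs.foldl _ (PySem.Chars.replace l [p.1] p.2) = pvChain qs (l.flatMap (pvSubst p))
      rw [pv_replace_single]
      exact ih _

theorem pv_alt_toList (text : String) :
    (processing_text_alt text).toList = pvChain pvPassesC (PySem.Str.lower text).toList := by
  unfold processing_text_alt
  rw [pv_foldl_corr pvPassesB pvPassesC (by decide) (PySem.Str.lower text)]
  exact pv_replace_eq_chain pvPassesC _

theorem pv_mk_toList (s : String) : String.mk s.toList = s :=
  String.ofList_toList

-- ===== VERDICT =====
theorem pv_hb (text : String) :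
    (processing_text_alt text).toList
      = ((PySem.Str.lower text).toList).flatMap pvStepA := by
  rw [pv_alt_toList, pv_chain_flatMap]
  exact List.flatMap_congr (fun c _ => pv_char_eq c)

theorem pv_ha (text : String) :
    processing_text text
      = String.mk (((PySem.Str.lower text).toList).flatMap pvStepA) := by
  unfold processing_text
  rw [PySem.List.foldl_append_eq_flatMap]
  simp

theorem processing_text_spec : Claim_equal_processing_text := by
  intro text _
  unfold Spec_processing_text
  rw [pv_ha, ← pv_hb]
  exact pv_mk_toList _
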